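-- pv_equiv track=rewrite | github.com/Professor-Zero/Bioinformatics-Code | RestrictionMaping.py | findSetLength
-- ===== SOURCE A (Python) =====
-- def findSetLength(multiSetlength):
--     n = -1
--     combination = multiSetlength*2
--     for i in range(combination):
--         equation = i * (i-1)
--         if equation == combination:
--             n = i
--             break
--     return n
-- ===== SOURCE B (Python) =====
-- def findSetLength(multiSetlength):
--     # Binary search for n with n*(n-1) == 2*multiSetlength (monotone for n >= 0).
--     target = 2 * multiSetlength
--     if target < 0:
--         return -1
--     lo, hi = 0, multiSetlength + 2
--     while lo < hi:
--         mid = (lo + hi) // 2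
--         v = mid * (mid - 1)
--         if v == target:
--             return mid
--         if v < target:
--             lo = mid + 1
--         else:
--             hi = mid
--     return -1
-- ===== Notes on version B (the rewrite author's own statement) =====
-- stated objective: faster
-- what changed: Replaced the linear scan of i in range(2*m) by a binary search for n with n*(n-1)==2*m over the monotone function n*(n-1).
-- intended difference: For multiSetlength 0 and 1 the equation n*(n-1)=2*multiSetlength does have a solution (n=1 resp. n=2) but A's loop bound range(2*multiSetlength) stops before it, so A returns -1; B returns the solution, which is the intended value. — e.g. on findSetLength(1): A returns -1, B returns 2
import Mathlib
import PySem

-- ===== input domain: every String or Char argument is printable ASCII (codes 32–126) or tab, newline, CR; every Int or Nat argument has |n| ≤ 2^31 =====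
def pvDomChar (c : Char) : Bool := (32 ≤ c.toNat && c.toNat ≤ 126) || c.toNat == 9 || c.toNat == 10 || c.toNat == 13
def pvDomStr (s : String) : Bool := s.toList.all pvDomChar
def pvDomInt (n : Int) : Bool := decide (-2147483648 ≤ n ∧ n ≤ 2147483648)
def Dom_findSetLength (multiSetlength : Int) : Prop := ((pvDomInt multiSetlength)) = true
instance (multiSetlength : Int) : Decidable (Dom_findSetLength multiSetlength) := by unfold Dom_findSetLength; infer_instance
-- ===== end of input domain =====

-- B replaces A's linear scan with a binary search on the monotone n*(n-1); on multiSetlength = 0 or 1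
-- A's loop bound range(2*multiSetlength) excludes the solution and A returns -1, B returns it (see D_).


-- ===== PORT A =====
-- the for-loop with break: first i in the list with i*(i-1) == combination, else the running n (= -1)
def findSetLoopA : List Int → Int → Int → Int
  | [], n, _ => n
  | i :: rest, n, combination =>
      if i * (i - 1) == combination then i else findSetLoopA rest n combination

def findSetLength (multiSetlength : Int) : Int :=
  let n : Int := -1
  let combination := multiSetlength * 2
  findSetLoopA (PySem.List.pyRange 0 combination 1) n combination

-- ===== PORT B =====
-- the binary-search while-loop of Source B; terminates since hi - lo shrinks
def findSetBS (target : Int) : Int → Int → Int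
  | lo, hi =>
      if h : lo < hi then
        let mid := PySem.Int.floordiv (lo + hi) 2
        let v := mid * (mid - 1)
        if v == target then mid
        else if v < target then findSetBS target (mid + 1) hi
        else findSetBS target lo mid
      else -1
  termination_by lo hi => (hi - lo).toNat
  decreasing_by
    · simp only [PySem.Int.floordiv_eq_ediv_of_pos (by norm_num : (0:Int) < 2)] at *; omega
    · simp only [PySem.Int.floordiv_eq_ediv_of_pos (by norm_num : (0:Int) < 2)] at *; omega

def findSetLength_alt (multiSetlength : Int) : Int :=
  let target := 2 * multiSetlength
  if target < 0 then -1
  else findSetBS target 0 (multiSetlength + 2)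

-- ===== PRECONDITION & SPEC =====
-- For multiSetlength 0 and 1, n*(n-1)=2*multiSetlength has the solution n=1 resp. n=2, but A's loop
-- bound range(2*multiSetlength) stops before it so A returns -1; B returns the solution, the intended value.
def D_findSetLength (multiSetlength : Int) : Prop := multiSetlength = 0 ∨ multiSetlength = 1
instance (multiSetlength : Int) : Decidable (D_findSetLength multiSetlength) := by unfold D_findSetLength; infer_instance

def Spec_findSetLength (multiSetlength : Int) (out : Int) : Prop :=
  ¬ D_findSetLength multiSetlength → out = findSetLength_alt multiSetlength
instance (multiSetlength : Int) (out : Int) : Decidable (Spec_findSetLength multiSetlength out) := by unfold Spec_findSetLength; infer_instance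

def pvDiffWitness_findSetLength : Int := 1
def pvDiffWitnessOut_findSetLength : Int × Int := (-1, 2)

-- ===== CLAIM (what is proved, stated in full; the proofs are below) =====
def Claim_unchanged_findSetLength : Prop := ∀ (multiSetlength : Int), Dom_findSetLength multiSetlength → Spec_findSetLength multiSetlength (findSetLength multiSetlength)
def Claim_changed_findSetLength : Prop := Dom_findSetLength (pvDiffWitness_findSetLength) ∧ D_findSetLength (pvDiffWitness_findSetLength) ∧ findSetLength (pvDiffWitness_findSetLength) = pvDiffWitnessOut_findSetLength.1 ∧ findSetLength_alt (pvDiffWitness_findSetLength) = pvDiffWitnessOut_findSetLength.2 ∧ pvDiffWitnessOut_findSetLength.1 ≠ pvDiffWitnessOut_findSetLength.2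
def Claim_exact_findSetLength : Prop := ∀ (multiSetlength : Int), Dom_findSetLength multiSetlength → D_findSetLength multiSetlength → findSetLength multiSetlength ≠ findSetLength_alt multiSetlength

-- ===== LEMMAS AND PROOFS =====

-- n*(n-1) = t > 0 with n ≥ 0 has at most one solution
theorem findSet_unique {a b t : Int} (ht : 0 < t) (ha : 0 ≤ a) (hb : 0 ≤ b)
    (h1 : a * (a - 1) = t) (h2 : b * (b - 1) = t) : a = b := by
  nlinarith [sq_nonneg (a - b), sq_nonneg (a + b - 1)]

-- A's loop: no hit in the list → returns the accumulator
theorem loopA_none (l : List Int) (n c : Int) (h : ∀ i ∈ l, i * (i - 1) ≠ c) :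
    findSetLoopA l n c = n := by
  induction l with
  | nil => rfl
  | cons i rest ih =>
      have hi := h i (by simp)
      simp only [findSetLoopA, beq_iff_eq, if_neg hi]
      exact ih fun j hj => h j (by simp [hj])

-- A's loop: a hit in the list that is unique → returns it
theorem loopA_hit (l : List Int) (n c x : Int) (hx : x ∈ l) (hxe : x * (x - 1) = c)
    (huniq : ∀ y ∈ l, y * (y - 1) = c → y = x) :
    findSetLoopA l n c = x := by
  induction l with
  | nil => cases hx
  | cons i rest ih =>
      by_cases hi : i * (i - 1) = c
      · simp only [findSetLoopA, beq_iff_eq, if_pos hi]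
        exact huniq i (by simp) hi
      · simp only [findSetLoopA, beq_iff_eq, if_neg hi]
        have hx' : x ∈ rest := by
          rcases List.mem_cons.mp hx with h | h
          · exact absurd (h ▸ hxe) hi
          · exact h
        exact ih hx' fun y hy => huniq y (by simp [hy])

-- B's search: no solution in [lo, hi) → -1
theorem bs_none (t : Int) (lo hi : Int)
    (h : ∀ x, lo ≤ x → x < hi → x * (x - 1) ≠ t) :
    findSetBS t lo hi = -1 := by
  rw [findSetBS]
  split_ifs with hlt
  · set mid := PySem.Int.floordiv (lo + hi) 2 with hmid
    rw [PySem.Int.floordiv_eq_ediv_of_pos (by norm_num : (0:Int) < 2)] at hmid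
    have hmlo : lo ≤ mid := by omega
    have hmhi : mid < hi := by omega
    have hne : mid * (mid - 1) ≠ t := h mid hmlo hmhi
    simp only [beq_iff_eq, if_neg hne]
    split_ifs with hv
    · exact bs_none t (mid + 1) hi fun x hx1 hx2 => h x (by omega) hx2
    · exact bs_none t lo mid fun x hx1 hx2 => h x hx1 (by omega)
  · rfl
  termination_by (hi - lo).toNat
  decreasing_by
    · omega
    · omega

-- B's search: solution x in [lo, hi), unique since t > 0, and 0 ≤ lo → returns x
theorem bs_hit (t : Int) (lo hi x : Int) (ht : 0 < t) (hlo : 0 ≤ lo)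
    (hx1 : lo ≤ x) (hx2 : x < hi) (hxe : x * (x - 1) = t) :
    findSetBS t lo hi = x := by
  rw [findSetBS]
  have hlt : lo < hi := by omega
  rw [dif_pos hlt]
  set mid := PySem.Int.floordiv (lo + hi) 2 with hmid
  rw [PySem.Int.floordiv_eq_ediv_of_pos (by norm_num : (0:Int) < 2)] at hmid
  have hmlo : lo ≤ mid := by omega
  have hmhi : mid < hi := by omega
  have hx0 : 2 ≤ x := by nlinarith
  by_cases he : mid * (mid - 1) = t
  · simp only [beq_iff_eq, if_pos he]
    exact findSet_unique ht (by omega) (by omega) he hxe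
  · simp only [beq_iff_eq, if_neg he]
    split_ifs with hv
    · -- mid*(mid-1) < t: every y ≤ mid (y ≥ 0) also has y*(y-1) ≤ mid*(mid-1) < t, so x > mid
      have hxgt : mid < x := by
        by_contra hle
        push_neg at hle
        have : x * (x - 1) ≤ mid * (mid - 1) := by nlinarith
        omega
      exact bs_hit t (mid + 1) hi x ht (by omega) (by omega) hx2 hxe
    · push_neg at hv
      have hxlt : x < mid := by
        by_contra hle
        push_neg at hle
        have : mid * (mid - 1) ≤ x * (x - 1) := by nlinarith
        omega
      exact bs_hit t lo mid x ht hlo hx1 hxlt hxe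
  termination_by (hi - lo).toNat
  decreasing_by
    · omega
    · omega

-- concrete values of B at the witness region (findSetBS is WF-recursive, so decide cannot evaluate it)
theorem alt_zero : findSetLength_alt 0 = 1 := by
  unfold findSetLength_alt
  norm_num
  rw [findSetBS]
  norm_num [PySem.Int.floordiv]

theorem alt_one : findSetLength_alt 1 = 2 := by
  unfold findSetLength_alt
  norm_num
  exact bs_hit 2 0 3 2 (by norm_num) le_rfl (by norm_num) (by norm_num) (by norm_num)

-- ===== VERDICT (by name: the statement is the Claim_ definition above) =====
theorem findSetLength_spec : Claim_unchanged_findSetLength := by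
  intro m _ hD
  have hne : m ≠ 0 ∧ m ≠ 1 := by
    constructor <;> intro h <;> exact hD (by simp [h, D_findSetLength])
  unfold findSetLength findSetLength_alt
  change findSetLoopA (PySem.List.pyRange 0 (m * 2) 1) (-1) (m * 2) =
    if 2 * m < 0 then -1 else findSetBS (2 * m) 0 (m + 2)
  by_cases hm : m < 0
  · rw [if_pos (by omega : 2 * m < 0)]
    have he : PySem.List.pyRange 0 (m * 2) 1 = [] := by
      simp [PySem.List.pyRange_one]; omega
    rw [he]; rfl
  · push_neg at hm
    have hm2 : 2 ≤ m := by omega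
    rw [if_neg (by omega : ¬ 2 * m < 0)]
    have ht : (0:Int) < 2 * m := by omega
    by_cases hex : ∃ x : Int, 0 ≤ x ∧ x * (x - 1) = 2 * m
    · obtain ⟨x, hx0, hxe⟩ := hex
      have hx2 : 2 ≤ x := by nlinarith
      have hxne2 : x ≠ 2 := by intro h; rw [h] at hxe; omega
      have hx3 : 3 ≤ x := by omega
      have hxm : x ≤ m := by nlinarith
      have hA : findSetLoopA (PySem.List.pyRange 0 (m * 2) 1) (-1) (m * 2) = x := by
        apply loopA_hit
        · rw [PySem.List.mem_pyRange_one]; constructor <;> omega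
        · linarith [hxe]
        · intro y hy hye
          rw [PySem.List.mem_pyRange_one] at hy
          exact findSet_unique (by omega : (0:Int) < m * 2) hy.1 hx0 hye (by linarith [hxe])
      have hB : findSetBS (2 * m) 0 (m + 2) = x :=
        bs_hit _ _ _ _ ht le_rfl hx0 (by omega) hxe
      rw [hA, hB]
    · push_neg at hex
      have hA : findSetLoopA (PySem.List.pyRange 0 (m * 2) 1) (-1) (m * 2) = -1 := by
        apply loopA_none
        intro i hi hie
        rw [PySem.List.mem_pyRange_one] at hi
        exact hex i hi.1 (by linarith [hie])
      have hB : findSetBS (2 * m) 0 (m + 2) = -1 := by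
        apply bs_none
        intro x hx1 _ hxe
        exact hex x hx1 hxe
      rw [hA, hB]

theorem findSetLength_changed : Claim_changed_findSetLength := by
  unfold Claim_changed_findSetLength
  refine ⟨by decide, by decide, by decide, ?_, by decide⟩
  exact alt_one

theorem findSetLength_tight : Claim_exact_findSetLength := by
  intro m _ hD
  rcases hD with h | h <;> subst h
  · rw [alt_zero]; decide
  · rw [alt_one]; decide
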